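-- pv_equiv track=rewrite | github.com/NewonOnGit/K43LTR0N | legacy/verify_osm.py | transitive_closure_equiv
-- ===== SOURCE A (Python) =====
-- def transitive_closure_equiv(pairs, n):
--     """Compute transitive closure of a set of pairs to get equivalence relation."""
--     parent = list(range(n))
--     def find(x):
--         while parent[x] != x:
--             parent[x] = parent[parent[x]]
--             x = parent[x]
--         return x
--     def union(x, y):
--         px, py = find(x), find(y)
--         if px != py:
--             parent[px] = py
--     for (a, b) in pairs:
--         union(a, b)
--     # Rebuild full equiv relation
--     result = set()
--     for i in range(n):
--         for j in range(n):
--             if find(i) == find(j):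
--                 result.add((i, j))
--     return result
-- ===== SOURCE B (Python) =====
-- def transitive_closure_equiv(pairs, n):
--     """Compute transitive closure of a set of pairs to get equivalence relation."""
--     parent = list(range(n))
--
--     def find(x):
--         while parent[x] != x:
--             x = parent[x]
--         return x
--
--     for (a, b) in pairs:
--         ra, rb = find(a), find(b)
--         if ra != rb:
--             parent[ra] = rb
--     # one find per element, then emit pairs group-wise via a root -> members index
--     comp = [find(i) for i in range(n)]
--     members = {}
--     for j in range(n):
--         members.setdefault(comp[j], []).append(j)
--     return {(i, j) for i in range(n) for j in members[comp[i]]}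
-- ===== Notes on version B (the rewrite author's own statement) =====
-- stated objective: faster
-- what changed: A runs two path-halving find() calls for every cell of an n*n grid to rebuild the relation; B does one plain find per element after the unions, groups elements by root in a dict, and emits each group's pairs directly, so the quadratic grid of find calls disappears.
import Mathlib
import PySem

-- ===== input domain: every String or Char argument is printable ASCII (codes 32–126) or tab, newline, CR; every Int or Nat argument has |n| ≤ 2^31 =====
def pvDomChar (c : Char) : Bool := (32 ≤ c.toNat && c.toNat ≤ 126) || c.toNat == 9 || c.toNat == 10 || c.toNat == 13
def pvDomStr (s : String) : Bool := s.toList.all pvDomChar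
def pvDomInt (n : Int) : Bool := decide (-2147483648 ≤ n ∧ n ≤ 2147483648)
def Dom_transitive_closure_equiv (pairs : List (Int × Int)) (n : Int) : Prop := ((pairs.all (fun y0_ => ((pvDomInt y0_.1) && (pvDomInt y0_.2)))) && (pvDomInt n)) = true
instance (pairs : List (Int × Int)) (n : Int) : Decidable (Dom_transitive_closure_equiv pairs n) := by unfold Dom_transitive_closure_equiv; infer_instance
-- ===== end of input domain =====

-- B replaces A's compressing union-find and its n×n grid of find() calls by a plain
-- union-find plus one find per element and a root→members index, emitting pairs group-wise.
-- Proved here: identical return value on every input where the Python A returns (Pre_).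

-- ===== PORT A =====
-- A's inner `find` (while-loop with path halving, mutating `parent`); the fuel
-- argument only makes the while-loop total, it is called with enough fuel
-- (parent.length + 1) for every terminating Python run.
def pvFindA (p : List Int) (x : Int) : Nat → List Int × Int
  | 0 => (p, x)
  | fuel + 1 =>
    let px := PySem.List.pyGetD p x 0
    if px = x then (p, x)
    else
      let g := PySem.List.pyGetD p px 0          -- parent[parent[x]]
      pvFindA (PySem.List.pySetD p x g) g fuel   -- parent[x] = g; x = parent[x] (= g)

def transitive_closure_equiv (pairs : List (Int × Int)) (n : Int) : List (Int × Int) :=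
  let parent0 := PySem.List.pyRange 0 n 1
  let parent1 := pairs.foldl (fun p ab =>
      let fx := pvFindA p ab.1 (p.length + 1)
      let fy := pvFindA fx.1 ab.2 (fx.1.length + 1)
      if fx.2 ≠ fy.2 then PySem.List.pySetD fy.1 fx.2 fy.2 else fy.1) parent0
  let st := (PySem.List.pyRange 0 n 1).foldl (fun st i =>
      (PySem.List.pyRange 0 n 1).foldl (fun st j =>
        let fi := pvFindA st.1 i (st.1.length + 1)
        let fj := pvFindA fi.1 j (fi.1.length + 1)
        (fj.1, if fi.2 = fj.2 then PySem.Set.add st.2 (i, j) else st.2)) st) (parent1, ([] : List (Int × Int)))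
  st.2

-- ===== PORT B =====
-- B's inner `find` (no mutation), fuel as above.
def pvFindB (p : List Int) (x : Int) : Nat → Int
  | 0 => x
  | fuel + 1 =>
    let px := PySem.List.pyGetD p x 0
    if px = x then x else pvFindB p px fuel

def transitive_closure_equiv_alt (pairs : List (Int × Int)) (n : Int) : List (Int × Int) :=
  let parent0 := PySem.List.pyRange 0 n 1
  let parent := pairs.foldl (fun p ab =>
      let ra := pvFindB p ab.1 (p.length + 1)
      let rb := pvFindB p ab.2 (p.length + 1)
      if ra ≠ rb then PySem.List.pySetD p ra rb else p) parent0
  let comp := (PySem.List.pyRange 0 n 1).map (fun i => pvFindB parent i (parent.length + 1))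
  let members := (PySem.List.enumerate comp 0).foldl
      (fun d q => d.modify q.2 [] (fun l => l ++ [q.1])) (PySem.Dict.empty : PySem.Dict Int (List Int))
  -- members[comp[i]] never raises: comp[i] is itself one of the keys inserted above
  (PySem.List.pyRange 0 n 1).foldl (fun res i =>
      (members.getD (PySem.List.pyGetD comp i 0) []).foldl
        (fun res j => PySem.Set.add res (i, j)) res) []

-- ===== PRECONDITION & SPEC =====
-- Pre_ excludes exactly the inputs on which Python A raises IndexError: some pair
-- component outside [-n, n) as an index into the length-n parent list.
def Pre_transitive_closure_equiv (pairs : List (Int × Int)) (n : Int) : Prop :=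
  ∀ ab ∈ pairs, PySem.Raise.InRange n.toNat ab.1 ∧ PySem.Raise.InRange n.toNat ab.2

instance (pairs : List (Int × Int)) (n : Int) : Decidable (Pre_transitive_closure_equiv pairs n) := by
  unfold Pre_transitive_closure_equiv; infer_instance

def pvWitness_transitive_closure_equiv : (List (Int × Int)) × Int := ([(0, 1), (-1, 0)], 3)

def Spec_transitive_closure_equiv (pairs : List (Int × Int)) (n : Int) (out : List (Int × Int)) : Prop := out = transitive_closure_equiv_alt pairs n
instance (pairs : List (Int × Int)) (n : Int) (out : List (Int × Int)) : Decidable (Spec_transitive_closure_equiv pairs n out) := by unfold Spec_transitive_closure_equiv; infer_instance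

-- ===== CLAIM (what is proved, stated in full; the proofs are below) =====
def Claim_equal_transitive_closure_equiv : Prop := ∀ (pairs : List (Int × Int)) (n : Int), Dom_transitive_closure_equiv pairs n → Pre_transitive_closure_equiv pairs n → Spec_transitive_closure_equiv pairs n (transitive_closure_equiv pairs n)

-- ===== LEMMAS AND PROOFS =====


def pvNorm (N : Nat) (x : Int) : Nat := if 0 ≤ x then x.toNat else N - (-x).toNat

theorem pvNorm_lt {N : Nat} {x : Int} (h : PySem.Raise.InRange N x) : pvNorm N x < N := by
  rcases h with ⟨h1, h2⟩
  unfold pvNorm; split <;> omega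

theorem pvNorm_natCast (N : Nat) (k : Nat) : pvNorm N (k : Int) = k := by
  unfold pvNorm; simp

theorem pvGetD_norm {xs : List Int} {x : Int} (h : PySem.Raise.InRange xs.length x) (d : Int) :
    PySem.List.pyGetD xs x d = xs.getD (pvNorm xs.length x) d := by
  rcases h with ⟨h1, h2⟩
  unfold PySem.List.pyGetD PySem.List.pyGet? PySem.List.pyIdx? pvNorm
  split_ifs <;> first | simp [List.getD] | omega

theorem pvSetD_norm {xs : List Int} {x : Int} (h : PySem.Raise.InRange xs.length x) (v : Int) :
    PySem.List.pySetD xs x v = xs.set (pvNorm xs.length x) v := by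
  rcases h with ⟨h1, h2⟩
  unfold PySem.List.pySetD PySem.List.pySet? PySem.List.pyIdx? pvNorm
  split_ifs <;> first | simp | omega

def pvStep (p : List Int) (x : Nat) : Nat := (p.getD x 0).toNat

def pvIter (p : List Int) (k : Nat) (x : Nat) : Nat := (pvStep p)^[k] x

def pvIsRoot (p : List Int) (x : Nat) : Prop := pvStep p x = x

def pvValid (p : List Int) : Prop :=
  (∀ i, i < p.length → 0 ≤ p.getD i 0 ∧ p.getD i 0 < (p.length : Int)) ∧
  (∀ x, x < p.length → ∃ k, pvIsRoot p (pvIter p k x))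

def pvRootN (p : List Int) (x : Nat) : Nat := pvIter p p.length x
-- d is the exact distance from x to its root

def pvMinD (p : List Int) (x : Nat) (d : Nat) : Prop :=
  pvIsRoot p (pvIter p d x) ∧ ∀ m, m < d → ¬ pvIsRoot p (pvIter p m x)

theorem pvIter_succ (p : List Int) (k x : Nat) :
    pvIter p (k + 1) x = pvIter p k (pvStep p x) := by
  unfold pvIter; rw [Function.iterate_succ_apply]

theorem pvIter_succ' (p : List Int) (k x : Nat) :
    pvIter p (k + 1) x = pvStep p (pvIter p k x) := by
  unfold pvIter; rw [Function.iterate_succ_apply']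

theorem pvIter_add (p : List Int) (a b x : Nat) :
    pvIter p (a + b) x = pvIter p a (pvIter p b x) := by
  unfold pvIter; rw [Function.iterate_add_apply]

theorem pvStep_lt {p : List Int} (hv : pvValid p) {x : Nat} (hx : x < p.length) :
    pvStep p x < p.length := by
  have := hv.1 x hx; unfold pvStep; omega

theorem pvIter_lt {p : List Int} (hv : pvValid p) {x : Nat} (hx : x < p.length) (k : Nat) :
    pvIter p k x < p.length := by
  induction k with
  | zero => exact hx
  | succ k ih => rw [pvIter_succ']; exact pvStep_lt hv ih

theorem pvRoot_stable {p : List Int} {r : Nat} (hr : pvIsRoot p r) (k : Nat) :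
    pvIter p k r = r := by
  induction k with
  | zero => rfl
  | succ k ih => rw [pvIter_succ', ih]; exact hr

-- existence of the exact root distance, below p.length

theorem pvMinD_exists {p : List Int} (hv : pvValid p) {x : Nat} (hx : x < p.length) :
    ∃ d, d < p.length ∧ pvMinD p x d := by
  have hex : ∃ k, pvIsRoot p (pvIter p k x) := hv.2 x hx
  have : DecidablePred (fun k => pvIsRoot p (pvIter p k x)) := by
    intro k; unfold pvIsRoot; infer_instance
  set d := Nat.find hex with hdub
  refine ⟨d, ?_, Nat.find_spec hex, fun m hm => Nat.find_min hex hm⟩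
  -- d < p.length via injectivity of m ↦ iter m x on [0, d]
  have hinj : Function.Injective (fun m : Fin (d + 1) => (⟨pvIter p m.1 x, pvIter_lt hv hx m.1⟩ : Fin p.length)) := by
    intro i j hij
    simp only [Fin.mk.injEq] at hij
    by_contra hne
    have key : ∀ (i j : Nat), i < j → j ≤ d → pvIter p i x = pvIter p j x → False := by
      intro i j hlt hle heq
      have : pvIsRoot p (pvIter p (i + (d - j)) x) := by
        rw [Nat.add_comm, pvIter_add, heq, ← pvIter_add]
        have : d - j + j = d := by omega
        rw [this]
        exact Nat.find_spec hex
      exact Nat.find_min hex (by omega) this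
    rcases Nat.lt_or_ge i.1 j.1 with h | h
    · exact key i.1 j.1 h (by omega) hij
    · have h' : j.1 < i.1 := by
        rcases Nat.lt_or_ge j.1 i.1 with h2 | h2
        · exact h2
        · exact absurd (Fin.ext (by omega)) hne
      exact key j.1 i.1 h' (by omega) hij.symm
  have := Fintype.card_le_of_injective _ hinj
  simp at this
  omega

theorem pvMinD_unique {p : List Int} {x d d' : Nat}
    (h : pvMinD p x d) (h' : pvMinD p x d') : d = d' := by
  by_contra hne
  rcases Nat.lt_or_ge d d' with hlt | hge
  · exact h'.2 d hlt h.1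
  · exact h.2 d' (lt_of_le_of_ne hge (fun he => hne he.symm)) h'.1

theorem pvMinD_step {p : List Int} {x d : Nat} (h : pvMinD p x (d + 1)) :
    pvMinD p (pvStep p x) d := by
  constructor
  · have := h.1; rwa [pvIter_succ] at this
  · intro m hm hr
    exact h.2 (m + 1) (by omega) (by rwa [pvIter_succ])

theorem pvRootN_eq_iter {p : List Int} {x d : Nat}
    (hd : pvIsRoot p (pvIter p d x)) (hdN : d ≤ p.length) :
    pvRootN p x = pvIter p d x := by
  unfold pvRootN
  have : p.length = (p.length - d) + d := by omega
  rw [this, pvIter_add, pvRoot_stable hd]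

theorem pvRootN_isRoot {p : List Int} (hv : pvValid p) {x : Nat} (hx : x < p.length) :
    pvIsRoot p (pvRootN p x) := by
  obtain ⟨d, hdN, hd⟩ := pvMinD_exists hv hx
  rw [pvRootN_eq_iter hd.1 (le_of_lt hdN)]; exact hd.1

theorem pvRootN_lt {p : List Int} (hv : pvValid p) {x : Nat} (hx : x < p.length) :
    pvRootN p x < p.length := pvIter_lt hv hx p.length

theorem pvRootN_of_root {p : List Int} {x : Nat} (hx : pvIsRoot p x) :
    pvRootN p x = x := pvRoot_stable hx p.length

theorem pvRootN_step {p : List Int} (hv : pvValid p) {x : Nat} (hx : x < p.length) :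
    pvRootN p (pvStep p x) = pvRootN p x := by
  obtain ⟨d, hdN, hd⟩ := pvMinD_exists hv hx
  cases d with
  | zero =>
    have hr : pvIsRoot p x := hd.1
    rw [pvRootN_of_root hr]
    have : pvStep p x = x := hr
    rw [this, pvRootN_of_root hr]
  | succ d =>
    have h2 := pvMinD_step hd
    rw [pvRootN_eq_iter hd.1 (by omega), pvRootN_eq_iter h2.1 (by omega), pvIter_succ]

theorem pvRootN_iter {p : List Int} (hv : pvValid p) {x : Nat} (hx : x < p.length) (k : Nat) :
    pvRootN p (pvIter p k x) = pvRootN p x := by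
  induction k with
  | zero => rfl
  | succ k ih =>
    rw [pvIter_succ']
    rw [pvRootN_step hv (pvIter_lt hv hx k), ih]

theorem pvRootN_rootN {p : List Int} (hv : pvValid p) {x : Nat} (hx : x < p.length) :
    pvRootN p (pvRootN p x) = pvRootN p x := pvRootN_of_root (pvRootN_isRoot hv hx)

theorem pvRoot_iff_rootN {p : List Int} (hv : pvValid p) {x : Nat} (hx : x < p.length) :
    pvIsRoot p x ↔ pvRootN p x = x := by
  constructor
  · exact pvRootN_of_root
  · intro h
    have := pvRootN_isRoot hv hx
    rwa [h] at this

-- the rewrite x ↦ ancestor preserves validity and all roots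

theorem pvRoot_unique {q : List Int} {y m m' : Nat}
    (h : pvIsRoot q (pvIter q m y)) (h' : pvIsRoot q (pvIter q m' y)) :
    pvIter q m y = pvIter q m' y := by
  rcases Nat.le_total m m' with hle | hle
  · have : pvIter q m' y = pvIter q (m' - m) (pvIter q m y) := by
      rw [← pvIter_add]; congr 1; omega
    rw [this, pvRoot_stable h]
  · have : pvIter q m y = pvIter q (m - m') (pvIter q m' y) := by
      rw [← pvIter_add]; congr 1; omega
    rw [this, pvRoot_stable h']

theorem pvRootN_eq_of_iter_root {q : List Int} (hv : pvValid q) {y m : Nat} (hy : y < q.length)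
    (h : pvIsRoot q (pvIter q m y)) : pvRootN q y = pvIter q m y := by
  obtain ⟨d, hdN, hd⟩ := pvMinD_exists hv hy
  rw [pvRootN_eq_iter hd.1 (le_of_lt hdN)]
  exact pvRoot_unique hd.1 h

theorem pvMinD_iter_lt {p : List Int} {x d : Nat} (h : pvMinD p x d) (hd : 1 ≤ d) {k : Nat} (hk : 1 ≤ k) :
    ∃ d', d' < d ∧ pvMinD p (pvIter p k x) d' := by
  rcases Nat.le_total k d with hkd | hkd
  · refine ⟨d - k, by omega, ?_, ?_⟩
    · have : pvIter p (d - k) (pvIter p k x) = pvIter p d x := by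
        rw [← pvIter_add]; congr 1; omega
      rw [this]; exact h.1
    · intro m hm hr
      rw [← pvIter_add] at hr
      exact h.2 (m + k) (by omega) hr
  · have heq : pvIter p k x = pvIter p d x := by
      have h2 : pvIter p k x = pvIter p (k - d) (pvIter p d x) := by
        rw [← pvIter_add]; congr 1; omega
      rw [h2, pvRoot_stable h.1]
    refine ⟨0, by omega, ?_, fun m hm => absurd hm (by omega)⟩
    show pvIsRoot p (pvIter p k x)
    rw [heq]; exact h.1

theorem pvStep_set {p : List Int} (hv : pvValid p) {x a : Nat} (hx : x < p.length) (ha : a < p.length)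
    {y : Nat} (hy : y < p.length) :
    pvStep (p.set x (a : Int)) y = if y = x then a else pvStep p y := by
  unfold pvStep
  rcases eq_or_ne y x with rfl | hne
  · simp [List.getD, List.getElem?_set_self (by simpa using hx)]
  · simp only [if_neg hne]
    rw [List.getD_eq_getElem _ _ (by simpa using hy), List.getD_eq_getElem _ _ hy,
      List.getElem_set_ne (by omega)]

theorem pvIsRoot_set_iff {p : List Int} (hv : pvValid p) {x a : Nat} (hx : x < p.length) (ha : a < p.length)
    {z : Nat} (hz : z < p.length) (hne : z ≠ x) :
    pvIsRoot (p.set x (a : Int)) z ↔ pvIsRoot p z := by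
  unfold pvIsRoot
  rw [pvStep_set hv hx ha hz, if_neg hne]

-- generic "reach a p2-root" ⇒ validity + rootN computation

theorem pvSet_valid_rootN {p : List Int} (hv : pvValid p) {x a : Nat} (hx : x < p.length) (ha : a < p.length)
    (R : Nat → Nat)
    (hRroot : ∀ y, y < p.length → pvIsRoot (p.set x (a : Int)) (R y))
    (hreach : ∀ y, y < p.length → ∃ m, pvIter (p.set x (a : Int)) m y = R y) :
    pvValid (p.set x (a : Int)) ∧ ∀ y, y < p.length → pvRootN (p.set x (a : Int)) y = R y := by
  have hlen : (p.set x (a : Int)).length = p.length := by simp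
  have hvalid : pvValid (p.set x (a : Int)) := by
    constructor
    · intro i hi
      rw [hlen] at hi
      rcases eq_or_ne i x with rfl | hne
      · rw [List.getD_eq_getElem _ _ (by simpa using hi), List.getElem_set_self (by simpa using hx)]
        constructor <;> [positivity; (rw [hlen]; exact_mod_cast ha)]
      · rw [List.getD_eq_getElem _ _ (by simpa using hi), List.getElem_set_ne (by omega)]
        simp only [List.length_set]
        have := hv.1 i hi
        rw [List.getD_eq_getElem _ _ hi] at this
        exact this
    · intro y hy
      rw [hlen] at hy
      obtain ⟨m, hm⟩ := hreach y hy
      exact ⟨m, hm ▸ hRroot y hy⟩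
  refine ⟨hvalid, fun y hy => ?_⟩
  obtain ⟨m, hm⟩ := hreach y hy
  have := pvRootN_eq_of_iter_root hvalid (y := y) (m := m) (by rw [hlen]; exact hy) (by rw [hm]; exact hRroot y hy)
  rw [this, hm]

theorem pvRewire {p : List Int} (hv : pvValid p) {x a k : Nat} (hx : x < p.length)
    (hnr : ¬ pvIsRoot p x) (ha : a = pvIter p k x) (hk : 1 ≤ k) :
    pvValid (p.set x (a : Int)) ∧ ∀ y, y < p.length → pvRootN (p.set x (a : Int)) y = pvRootN p y := by
  have haN : a < p.length := ha ▸ pvIter_lt hv hx k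
  -- roots of p except x stay roots (x is no root)
  have hroots : ∀ y, y < p.length → pvIsRoot (p.set x (a : Int)) (pvRootN p y) := by
    intro y hy
    have hr := pvRootN_isRoot hv hy
    have hrne : pvRootN p y ≠ x := fun he => hnr (he ▸ hr)
    exact (pvIsRoot_set_iff hv hx haN (pvRootN_lt hv hy) hrne).mpr hr
  refine pvSet_valid_rootN hv hx haN (pvRootN p) hroots ?_
  -- reach by strong induction on the minimal distance
  intro y hy
  obtain ⟨d, hdN, hd⟩ := pvMinD_exists hv hy
  clear hdN
  induction d using Nat.strong_induction_on generalizing y with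
  | _ d ih =>
    by_cases hyroot : pvIsRoot p y
    · exact ⟨0, (pvRootN_of_root hyroot).symm⟩
    · have hd1 : 1 ≤ d := by
        rcases Nat.eq_zero_or_pos d with rfl | h
        · exact absurd hd.1 hyroot
        · exact h
      rcases eq_or_ne y x with rfl | hne
      · -- step to a
        obtain ⟨d', hd'lt, hd'⟩ := pvMinD_iter_lt hd hd1 hk
        obtain ⟨m, hm⟩ := ih d' hd'lt (pvIter p k y) (pvIter_lt hv hy k) hd'
        refine ⟨m + 1, ?_⟩
        rw [ha] at hm ⊢
        rw [pvIter_succ, pvStep_set hv hx (ha ▸ haN) hy, if_pos rfl, hm, pvRootN_iter hv hy]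
      · -- step as in p
        have hstep : pvStep (p.set x (a : Int)) y = pvStep p y := by
          rw [pvStep_set hv hx haN hy, if_neg hne]
        obtain ⟨d', hd'lt, hd'⟩ := pvMinD_iter_lt hd hd1 (k := 1) le_rfl
        have hstep1 : pvIter p 1 y = pvStep p y := by simp [pvIter]
        obtain ⟨m, hm⟩ := ih d' hd'lt (pvStep p y) (pvStep_lt hv hy) (hstep1 ▸ hd')
        refine ⟨m + 1, ?_⟩
        rw [pvIter_succ, hstep, hm, pvRootN_step hv hy]

theorem pvLink {p : List Int} (hv : pvValid p) {r b : Nat} (hr : r < p.length) (hb : b < p.length)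
    (hrr : pvIsRoot p r) (hrb : pvIsRoot p b) (hne : r ≠ b) :
    pvValid (p.set r (b : Int)) ∧ ∀ y, y < p.length →
      pvRootN (p.set r (b : Int)) y = if pvRootN p y = r then b else pvRootN p y := by
  have hbroot2 : pvIsRoot (p.set r (b : Int)) b :=
    (pvIsRoot_set_iff hv hr hb hb (Ne.symm hne)).mpr hrb
  have hroots : ∀ y, y < p.length →
      pvIsRoot (p.set r (b : Int)) (if pvRootN p y = r then b else pvRootN p y) := by
    intro y hy
    split_ifs with hc
    · exact hbroot2
    · exact (pvIsRoot_set_iff hv hr hb (pvRootN_lt hv hy) hc).mpr (pvRootN_isRoot hv hy)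
  refine pvSet_valid_rootN hv hr hb _ hroots ?_
  intro y hy
  obtain ⟨d, hdN, hd⟩ := pvMinD_exists hv hy
  clear hdN
  induction d using Nat.strong_induction_on generalizing y with
  | _ d ih =>
    by_cases hyroot : pvIsRoot p y
    · rcases eq_or_ne y r with rfl | hyr
      · refine ⟨1, ?_⟩
        have : pvIter (p.set y (b : Int)) 1 y = pvStep (p.set y (b : Int)) y := by simp [pvIter]
        rw [this, pvStep_set hv hr hb hy, if_pos rfl, pvRootN_of_root hyroot, if_pos rfl]
      · refine ⟨0, ?_⟩
        rw [pvRootN_of_root hyroot, if_neg hyr]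
        simp [pvIter]
    · have hd1 : 1 ≤ d := by
        rcases Nat.eq_zero_or_pos d with rfl | h
        · exact absurd hd.1 hyroot
        · exact h
      have hyr : y ≠ r := fun he => hyroot (he ▸ hrr)
      have hstep : pvStep (p.set r (b : Int)) y = pvStep p y := by
        rw [pvStep_set hv hr hb hy, if_neg hyr]
      obtain ⟨d', hd'lt, hd'⟩ := pvMinD_iter_lt hd hd1 (k := 1) le_rfl
      have hstep1 : pvIter p 1 y = pvStep p y := by simp [pvIter]
      obtain ⟨m, hm⟩ := ih d' hd'lt (pvStep p y) (pvStep_lt hv hy) (hstep1 ▸ hd')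
      refine ⟨m + 1, ?_⟩
      rw [pvIter_succ, hstep, hm, pvRootN_step hv hy]

theorem pvMinD_iter_exact {p : List Int} {x d : Nat} (h : pvMinD p x d) {t : Nat} (ht : t ≤ d) :
    pvMinD p (pvIter p t x) (d - t) := by
  constructor
  · have : pvIter p (d - t) (pvIter p t x) = pvIter p d x := by
      rw [← pvIter_add]; congr 1; omega
    rw [this]; exact h.1
  · intro m hm hr
    rw [← pvIter_add] at hr
    exact h.2 (m + t) (by omega) hr

theorem pvMinD_pos_of_not_root {p : List Int} {x d : Nat} (h : pvMinD p x d) (hnr : ¬ pvIsRoot p x) :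
    1 ≤ d := by
  rcases Nat.eq_zero_or_pos d with rfl | hp
  · exact absurd h.1 hnr
  · exact hp

-- one halving step of A's find: state after `parent[x] = parent[parent[x]]`

theorem pvHalve {p : List Int} (hv : pvValid p) {x d : Nat} (hx : x < p.length)
    (hnr : ¬ pvIsRoot p x) (hd : pvMinD p x d) :
    pvValid (p.set x ((pvIter p 2 x : Nat) : Int)) ∧
    (∀ y, y < p.length → pvRootN (p.set x ((pvIter p 2 x : Nat) : Int)) y = pvRootN p y) ∧
    ∃ d', d' < d ∧ pvMinD (p.set x ((pvIter p 2 x : Nat) : Int)) (pvIter p 2 x) d' := by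
  have hd1 : 1 ≤ d := pvMinD_pos_of_not_root hd hnr
  have hg : pvIter p 2 x < p.length := pvIter_lt hv hx 2
  obtain ⟨hv2, hroot2⟩ := pvRewire hv hx hnr rfl (k := 2) (by omega)
  obtain ⟨d', hd'lt, hd'⟩ := pvMinD_iter_lt hd hd1 (k := 2) (by omega)
  refine ⟨hv2, hroot2, d', hd'lt, ?_⟩
  -- the p-path from g := iter 2 x avoids x, so iteration in p2 agrees with p
  have hne_x : ∀ t, t ≤ d' → pvIter p t (pvIter p 2 x) ≠ x := by
    intro t ht he
    have h1 : pvMinD p (pvIter p t (pvIter p 2 x)) (d' - t) := pvMinD_iter_exact hd' ht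
    rw [he] at h1
    have := pvMinD_unique hd h1
    omega
  have hiter : ∀ t, t ≤ d' → pvIter (p.set x ((pvIter p 2 x : Nat) : Int)) t (pvIter p 2 x) = pvIter p t (pvIter p 2 x) := by
    obtain ⟨g, hgdef⟩ : ∃ g, pvIter p 2 x = g := ⟨_, rfl⟩
    rw [hgdef] at hg hne_x ⊢
    intro t ht
    induction t with
    | zero => rfl
    | succ t iht =>
      rw [pvIter_succ', pvIter_succ', iht (by omega),
        pvStep_set hv hx hg (pvIter_lt hv hg t), if_neg (hne_x t (by omega))]
  constructor
  · rw [hiter d' le_rfl]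
    exact (pvIsRoot_set_iff hv hx hg (pvIter_lt hv hg d') (hne_x d' le_rfl)).mpr hd'.1
  · intro m hm hr
    rw [hiter m (by omega)] at hr
    exact hd'.2 m hm ((pvIsRoot_set_iff hv hx hg (pvIter_lt hv hg m) (hne_x m (by omega))).mp hr)

theorem pvGetD_step {p : List Int} (hv : pvValid p) {x : Nat} (hx : x < p.length) :
    p.getD x 0 = ((pvStep p x : Nat) : Int) := by
  have := (hv.1 x hx).1
  unfold pvStep
  omega

theorem pvIter_two (p : List Int) (x : Nat) : pvIter p 2 x = pvStep p (pvStep p x) := by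
  show (pvStep p)^[2] x = _
  rw [Function.iterate_succ_apply', Function.iterate_one]

theorem pvFindA_nonneg : ∀ (fuel : Nat) (p : List Int) (x d : Nat), pvValid p → x < p.length →
    pvMinD p x d → d < fuel →
    ∃ p', pvFindA p (x : Int) fuel = (p', (pvRootN p x : Int)) ∧
      pvValid p' ∧ p'.length = p.length ∧ ∀ y, y < p.length → pvRootN p' y = pvRootN p y := by
  intro fuel
  induction fuel with
  | zero => intro p x d _ _ _ h; omega
  | succ f ih =>
    intro p x d hv hx hd hfuel
    have hpx : PySem.List.pyGetD p ((x : Nat) : Int) 0 = ((pvStep p x : Nat) : Int) := by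
      rw [PySem.List.pyGetD_natCast, pvGetD_step hv hx]
    by_cases hroot : pvIsRoot p x
    · refine ⟨p, ?_, hv, rfl, fun y _ => rfl⟩
      simp only [pvFindA, hpx]
      rw [if_pos (by exact_mod_cast hroot), pvRootN_of_root hroot]
    · have hd1 : 1 ≤ d := pvMinD_pos_of_not_root hd hroot
      obtain ⟨hv2, hroot2, d', hd'lt, hd'⟩ := pvHalve hv hx hroot hd
      have hg : pvIter p 2 x < p.length := pvIter_lt hv hx 2
      have hlen2 : (p.set x ((pvIter p 2 x : Nat) : Int)).length = p.length := by simp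
      obtain ⟨p', he, hvp', hlp', hrp'⟩ :=
        ih (p.set x ((pvIter p 2 x : Nat) : Int)) (pvIter p 2 x) d' hv2 (by rw [hlen2]; exact hg) hd' (by omega)
      refine ⟨p', ?_, hvp', by rw [hlp', hlen2], fun y hy => ?_⟩
      · simp only [pvFindA, hpx]
        rw [if_neg (by exact_mod_cast (fun h => hroot h))]
        have hg2 : PySem.List.pyGetD p ((pvStep p x : Nat) : Int) 0 = ((pvIter p 2 x : Nat) : Int) := by
          rw [PySem.List.pyGetD_natCast, pvGetD_step hv (pvStep_lt hv hx), pvIter_two]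
        rw [hg2, PySem.List.pySetD_natCast, he, hroot2 _ hg, pvRootN_iter hv hx 2]
      · rw [hrp' y (by rw [hlen2]; exact hy), hroot2 y hy]

theorem pvFindB_nonneg : ∀ (fuel : Nat) (p : List Int) (x d : Nat), pvValid p → x < p.length →
    pvMinD p x d → d < fuel →
    pvFindB p (x : Int) fuel = (pvRootN p x : Int) := by
  intro fuel
  induction fuel with
  | zero => intro p x d _ _ _ h; omega
  | succ f ih =>
    intro p x d hv hx hd hfuel
    have hpx : PySem.List.pyGetD p ((x : Nat) : Int) 0 = ((pvStep p x : Nat) : Int) := by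
      rw [PySem.List.pyGetD_natCast, pvGetD_step hv hx]
    by_cases hroot : pvIsRoot p x
    · simp only [pvFindB, hpx]
      rw [if_pos (by exact_mod_cast hroot), pvRootN_of_root hroot]
    · have hd1 : 1 ≤ d := pvMinD_pos_of_not_root hd hroot
      obtain ⟨d', hd'lt, hd'⟩ := pvMinD_iter_lt hd hd1 (k := 1) le_rfl
      have hstep1 : pvIter p 1 x = pvStep p x := by
        show (pvStep p)^[1] x = _; rw [Function.iterate_one]
      simp only [pvFindB, hpx]
      rw [if_neg (by exact_mod_cast (fun h => hroot h)),
        ih p (pvStep p x) d' hv (pvStep_lt hv hx) (hstep1 ▸ hd') (by omega),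
        pvRootN_step hv hx]

theorem pvFindA_spec {p : List Int} (hv : pvValid p) {x : Int}
    (hx : PySem.Raise.InRange p.length x) :
    ∃ p', pvFindA p x (p.length + 1) = (p', (pvRootN p (pvNorm p.length x) : Int)) ∧
      pvValid p' ∧ p'.length = p.length ∧ ∀ y, y < p.length → pvRootN p' y = pvRootN p y := by
  have hxN : pvNorm p.length x < p.length := pvNorm_lt hx
  obtain ⟨d, hdN, hd⟩ := pvMinD_exists hv hxN
  rcases le_or_gt 0 x with hx0 | hx0
  · have hcast : x = ((pvNorm p.length x : Nat) : Int) := by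
      unfold pvNorm; rw [if_pos hx0]; omega
    rw [hcast]
    exact pvFindA_nonneg (p.length + 1) p (pvNorm p.length x) d hv hxN hd (by omega)
  · -- negative in-range index: one loop iteration, then the nonnegative case
    set x' := pvNorm p.length x with hx'
    have hpx : PySem.List.pyGetD p x 0 = ((pvStep p x' : Nat) : Int) := by
      rw [pvGetD_norm hx, ← hx', pvGetD_step hv hxN]
    have hxne : ((pvStep p x' : Nat) : Int) ≠ x := by
      intro h; omega
    by_cases hroot : pvIsRoot p x'
    · -- parent[x] == parent[parent[x]] already; the write is a no-op
      have hswap : PySem.List.pySetD p x (PySem.List.pyGetD p ((pvStep p x' : Nat) : Int) 0) = p := by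
        rw [PySem.List.pyGetD_natCast, pvGetD_step hv (pvStep_lt hv hxN), pvSetD_norm hx, ← hx']
        have h1 : pvStep p x' = x' := hroot
        have h2 : pvStep p (pvStep p x') = x' := by rw [h1]; exact h1
        rw [h2]
        have hgd : p[x'] = ((x' : Nat) : Int) := by
          have := pvGetD_step hv hxN (x := x')
          rw [List.getD_eq_getElem _ _ hxN, h1] at this
          exact this
        calc p.set x' ((x' : Nat) : Int) = p.set x' p[x'] := by rw [hgd]
          _ = p := List.set_getElem_self hxN
      simp only [pvFindA, hpx]
      rw [if_neg hxne, hswap]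
      have h1 : pvStep p x' = x' := hroot
      have hgoal : PySem.List.pyGetD p ((pvStep p x' : Nat) : Int) 0 = ((x' : Nat) : Int) := by
        rw [PySem.List.pyGetD_natCast, pvGetD_step hv (pvStep_lt hv hxN), h1, h1]
      rw [hgoal]
      exact pvFindA_nonneg (p.length) p x' d hv hxN hd (by omega)
    · obtain ⟨hv2, hroot2, d', hd'lt, hd'⟩ := pvHalve hv hxN hroot hd
      have hg : pvIter p 2 x' < p.length := pvIter_lt hv hxN 2
      have hlen2 : (p.set x' ((pvIter p 2 x' : Nat) : Int)).length = p.length := by simp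
      obtain ⟨p', he, hvp', hlp', hrp'⟩ :=
        pvFindA_nonneg p.length (p.set x' ((pvIter p 2 x' : Nat) : Int)) (pvIter p 2 x') d'
          hv2 (by rw [hlen2]; exact hg) hd' (by omega)
      refine ⟨p', ?_, hvp', by rw [hlp', hlen2], fun y hy => ?_⟩
      · simp only [pvFindA, hpx]
        rw [if_neg hxne]
        have hg2 : PySem.List.pyGetD p ((pvStep p x' : Nat) : Int) 0 = ((pvIter p 2 x' : Nat) : Int) := by
          rw [PySem.List.pyGetD_natCast, pvGetD_step hv (pvStep_lt hv hxN), pvIter_two]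
        rw [hg2, pvSetD_norm hx, ← hx', he, hroot2 _ hg, pvRootN_iter hv hxN 2]
      · rw [hrp' y (by rw [hlen2]; exact hy), hroot2 y hy]

theorem pvFindB_spec {p : List Int} (hv : pvValid p) {x : Int}
    (hx : PySem.Raise.InRange p.length x) :
    pvFindB p x (p.length + 1) = (pvRootN p (pvNorm p.length x) : Int) := by
  have hxN : pvNorm p.length x < p.length := pvNorm_lt hx
  obtain ⟨d, hdN, hd⟩ := pvMinD_exists hv hxN
  rcases le_or_gt 0 x with hx0 | hx0
  · have hcast : x = ((pvNorm p.length x : Nat) : Int) := by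
      unfold pvNorm; rw [if_pos hx0]; omega
    rw [hcast]
    exact pvFindB_nonneg (p.length + 1) p (pvNorm p.length x) d hv hxN hd (by omega)
  · set x' := pvNorm p.length x with hx'
    have hpx : PySem.List.pyGetD p x 0 = ((pvStep p x' : Nat) : Int) := by
      rw [pvGetD_norm hx, ← hx', pvGetD_step hv hxN]
    have hxne : ((pvStep p x' : Nat) : Int) ≠ x := by intro h; omega
    simp only [pvFindB, hpx]
    rw [if_neg hxne]
    obtain ⟨d2, hd2N, hd2⟩ := pvMinD_exists hv (pvStep_lt hv hxN)
    rw [pvFindB_nonneg p.length p (pvStep p x') d2 hv (pvStep_lt hv hxN) hd2 (by omega),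
      pvRootN_step hv hxN]

theorem pvP0_getD {n : Int} {i : Nat} (hi : i < n.toNat) :
    (PySem.List.pyRange 0 n 1).getD i 0 = (i : Int) := by
  rw [PySem.List.pyRange_one]
  rw [PySem.List.getD_map_range _ _ _ _ (by simpa using hi)]
  simp

theorem pvP0_len (n : Int) : (PySem.List.pyRange 0 n 1).length = n.toNat := by
  rw [PySem.List.length_pyRange_one]; simp

theorem pvP0_valid (n : Int) : pvValid (PySem.List.pyRange 0 n 1) := by
  have hroot : ∀ x, x < (PySem.List.pyRange 0 n 1).length → pvIsRoot (PySem.List.pyRange 0 n 1) x := by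
    intro x hx
    unfold pvIsRoot pvStep
    rw [pvP0_getD (by rwa [pvP0_len] at hx)]
    simp
  constructor
  · intro i hi
    rw [pvP0_getD (by rwa [pvP0_len] at hi)]
    rw [pvP0_len] at hi ⊢
    constructor <;> [positivity; exact_mod_cast hi]
  · intro x hx
    exact ⟨0, hroot x hx⟩


-- the root function after union(a, b)

def pvLinkFun (R : Nat → Nat) (na nb y : Nat) : Nat :=
  if R y = R na ∧ R na ≠ R nb then R nb else R y

-- one union step, A's side

theorem pvStepA_spec {p : List Int} (hv : pvValid p) {a b : Int}
    (ha : PySem.Raise.InRange p.length a) (hb : PySem.Raise.InRange p.length b) :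
    ∃ q, (let fx := pvFindA p a (p.length + 1);
          let fy := pvFindA fx.1 b (fx.1.length + 1);
          if fx.2 ≠ fy.2 then PySem.List.pySetD fy.1 fx.2 fy.2 else fy.1) = q ∧
      pvValid q ∧ q.length = p.length ∧
      ∀ y, y < p.length → pvRootN q y = pvLinkFun (pvRootN p) (pvNorm p.length a) (pvNorm p.length b) y := by
  obtain ⟨p1, he1, hv1, hl1, hr1⟩ := pvFindA_spec hv ha
  have hb1 : PySem.Raise.InRange p1.length b := by rwa [hl1]
  obtain ⟨p2, he2, hv2, hl2, hr2⟩ := pvFindA_spec hv1 hb1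
  have hna : pvNorm p.length a < p.length := pvNorm_lt ha
  have hnb : pvNorm p.length b < p.length := pvNorm_lt hb
  set ra := pvRootN p (pvNorm p.length a) with hra
  set rb := pvRootN p (pvNorm p.length b) with hrb
  have hrb1 : pvRootN p1 (pvNorm p1.length b) = rb := by
    rw [hl1, hr1 _ hnb]
  have hl2' : p2.length = p.length := by rw [hl2, hl1]
  have hr2' : ∀ y, y < p.length → pvRootN p2 y = pvRootN p y := by
    intro y hy
    rw [hr2 y (by rwa [hl1]), hr1 y hy]
  simp only [he1, hrb1] at *
  rcases eq_or_ne ra rb with heq | hne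
  · -- no link
    refine ⟨p2, ?_, hv2, hl2', fun y hy => ?_⟩
    · simp only [he1, he2, heq]
      simp
    · rw [hr2' y hy]
      unfold pvLinkFun
      rw [← hra, ← hrb, heq]
      simp
  · -- link ra ↦ rb
    have hraP : ra < p.length := pvRootN_lt hv hna
    have hrbP : rb < p.length := pvRootN_lt hv hnb
    have hrootA : pvIsRoot p2 ra := by
      rw [pvRoot_iff_rootN hv2 (by rwa [hl2'])]
      rw [hr2' _ hraP, hra, pvRootN_rootN hv hna]
    have hrootB : pvIsRoot p2 rb := by
      rw [pvRoot_iff_rootN hv2 (by rwa [hl2'])]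
      rw [hr2' _ hrbP, hrb, pvRootN_rootN hv hnb]
    obtain ⟨hvq, hrq⟩ := pvLink hv2 (by rwa [hl2']) (by rwa [hl2']) hrootA hrootB hne
    refine ⟨p2.set ra ((rb : Nat) : Int), ?_, hvq, by simp [hl2'], fun y hy => ?_⟩
    · simp only [he1, he2]
      rw [if_pos (by exact_mod_cast hne)]
      rw [PySem.List.pySetD_natCast]
    · rw [hrq y (by rwa [hl2']), hr2' y hy]
      unfold pvLinkFun
      rw [← hra, ← hrb]
      simp only [hne, ne_eq, not_false_iff, and_true]

-- one union step, B's side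

theorem pvStepB_spec {p : List Int} (hv : pvValid p) {a b : Int}
    (ha : PySem.Raise.InRange p.length a) (hb : PySem.Raise.InRange p.length b) :
    ∃ q, (let ra := pvFindB p a (p.length + 1);
          let rb := pvFindB p b (p.length + 1);
          if ra ≠ rb then PySem.List.pySetD p ra rb else p) = q ∧
      pvValid q ∧ q.length = p.length ∧
      ∀ y, y < p.length → pvRootN q y = pvLinkFun (pvRootN p) (pvNorm p.length a) (pvNorm p.length b) y := by
  have hna : pvNorm p.length a < p.length := pvNorm_lt ha
  have hnb : pvNorm p.length b < p.length := pvNorm_lt hb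
  set ra := pvRootN p (pvNorm p.length a) with hra
  set rb := pvRootN p (pvNorm p.length b) with hrb
  rcases eq_or_ne ra rb with heq | hne
  · refine ⟨p, ?_, hv, rfl, fun y hy => ?_⟩
    · simp only [pvFindB_spec hv ha, pvFindB_spec hv hb, ← hra, ← hrb, heq]
      simp
    · unfold pvLinkFun
      rw [← hra, ← hrb, heq]
      simp
  · have hraP : ra < p.length := pvRootN_lt hv hna
    have hrbP : rb < p.length := pvRootN_lt hv hnb
    have hrootA : pvIsRoot p ra := pvRootN_isRoot hv hna
    have hrootB : pvIsRoot p rb := pvRootN_isRoot hv hnb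
    obtain ⟨hvq, hrq⟩ := pvLink hv hraP hrbP hrootA hrootB hne
    refine ⟨p.set ra ((rb : Nat) : Int), ?_, hvq, by simp, fun y hy => ?_⟩
    · simp only [pvFindB_spec hv ha, pvFindB_spec hv hb, ← hra, ← hrb]
      rw [if_pos (by exact_mod_cast hne), PySem.List.pySetD_natCast]
    · rw [hrq y hy]
      unfold pvLinkFun
      rw [← hra, ← hrb]
      simp only [hne, ne_eq, not_false_iff, and_true]

-- the union phase keeps the two sides' root functions equal

theorem pvUnion_fold (M : Nat) : ∀ (pairs : List (Int × Int)),
    (∀ ab ∈ pairs, PySem.Raise.InRange M ab.1 ∧ PySem.Raise.InRange M ab.2) →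
    ∀ (pA pB : List Int), pvValid pA → pvValid pB → pA.length = M → pB.length = M →
    (∀ y, y < M → pvRootN pA y = pvRootN pB y) →
    (pvValid (pairs.foldl (fun p ab =>
        let fx := pvFindA p ab.1 (p.length + 1)
        let fy := pvFindA fx.1 ab.2 (fx.1.length + 1)
        if fx.2 ≠ fy.2 then PySem.List.pySetD fy.1 fx.2 fy.2 else fy.1) pA)) ∧
    (pvValid (pairs.foldl (fun p ab =>
        let ra := pvFindB p ab.1 (p.length + 1)
        let rb := pvFindB p ab.2 (p.length + 1)
        if ra ≠ rb then PySem.List.pySetD p ra rb else p) pB)) ∧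
    (pairs.foldl (fun p ab =>
        let fx := pvFindA p ab.1 (p.length + 1)
        let fy := pvFindA fx.1 ab.2 (fx.1.length + 1)
        if fx.2 ≠ fy.2 then PySem.List.pySetD fy.1 fx.2 fy.2 else fy.1) pA).length = M ∧
    (pairs.foldl (fun p ab =>
        let ra := pvFindB p ab.1 (p.length + 1)
        let rb := pvFindB p ab.2 (p.length + 1)
        if ra ≠ rb then PySem.List.pySetD p ra rb else p) pB).length = M ∧
    ∀ y, y < M →
      pvRootN (pairs.foldl (fun p ab =>
        let fx := pvFindA p ab.1 (p.length + 1)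
        let fy := pvFindA fx.1 ab.2 (fx.1.length + 1)
        if fx.2 ≠ fy.2 then PySem.List.pySetD fy.1 fx.2 fy.2 else fy.1) pA) y =
      pvRootN (pairs.foldl (fun p ab =>
        let ra := pvFindB p ab.1 (p.length + 1)
        let rb := pvFindB p ab.2 (p.length + 1)
        if ra ≠ rb then PySem.List.pySetD p ra rb else p) pB) y := by
  intro pairs
  induction pairs with
  | nil => intro _ pA pB hvA hvB hlA hlB hR; exact ⟨hvA, hvB, hlA, hlB, hR⟩
  | cons ab rest ih =>
    intro hpre pA pB hvA hvB hlA hlB hR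
    have hab := hpre ab (by simp)
    have haA : PySem.Raise.InRange pA.length ab.1 := by rw [hlA]; exact hab.1
    have hbA : PySem.Raise.InRange pA.length ab.2 := by rw [hlA]; exact hab.2
    have haB : PySem.Raise.InRange pB.length ab.1 := by rw [hlB]; exact hab.1
    have hbB : PySem.Raise.InRange pB.length ab.2 := by rw [hlB]; exact hab.2
    obtain ⟨qA, heA, hvqA, hlqA, hrqA⟩ := pvStepA_spec hvA haA hbA
    obtain ⟨qB, heB, hvqB, hlqB, hrqB⟩ := pvStepB_spec hvB haB hbB
    simp only [List.foldl_cons, heA, heB]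
    apply ih (fun x hx => hpre x (by simp [hx])) qA qB hvqA hvqB (by rw [hlqA, hlA]) (by rw [hlqB, hlB])
    intro y hy
    rw [hrqA y (by rwa [hlA]), hrqB y (by rwa [hlB]), hlA, hlB]
    unfold pvLinkFun
    rw [hR _ hy, hR _ (pvNorm_lt hab.1), hR _ (pvNorm_lt hab.2)]

theorem pvRange_eq (n : Int) :
    PySem.List.pyRange 0 n 1 = (List.range n.toNat).map (fun k : Nat => (k : Int)) := by
  rw [PySem.List.pyRange_one]
  have h0 : (n - 0).toNat = n.toNat := by omega
  rw [h0]
  exact List.map_congr_left (fun k _ => by omega)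

theorem pvAdd_fresh {s : List (Int × Int)} {x : Int × Int} (h : x ∉ s) :
    PySem.Set.add s x = s ++ [x] := by
  simp [PySem.Set.add, h]

theorem pvFoldAddPairs (i : Int) : ∀ (l : List Int) (s : List (Int × Int)),
    l.Nodup → (∀ j ∈ l, (i, j) ∉ s) →
    l.foldl (fun res j => PySem.Set.add res (i, j)) s = s ++ l.map (fun j => (i, j)) := by
  intro l
  induction l with
  | nil => intro s _ _; simp
  | cons j t ih =>
    intro s hnd hfresh
    simp only [List.foldl_cons, List.map_cons]
    rw [pvAdd_fresh (hfresh j (by simp))]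
    rw [ih (s ++ [(i, j)]) hnd.of_cons ?fresh]
    · simp
    case fresh =>
      intro j' hj' hmem
      rcases List.mem_append.mp hmem with h | h
      · exact hfresh j' (by simp [hj']) h
      · simp only [List.mem_singleton, Prod.mk.injEq] at h
        exact (List.nodup_cons.mp hnd).1 (h.2 ▸ hj')

-- the common output list: groups in lexicographic emission order

def pvOutK (R : Nat → Nat) (M K : Nat) : List (Int × Int) :=
  (List.range K).flatMap (fun i =>
    ((List.range M).filter (fun j => decide (R i = R j))).map (fun j => ((i : Int), (j : Int))))

theorem pvOutK_fst {R : Nat → Nat} {M K : Nat} {q : Int × Int} (h : q ∈ pvOutK R M K) :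
    ∃ i < K, q.1 = (i : Int) := by
  unfold pvOutK at h
  simp only [List.mem_flatMap, List.mem_map, List.mem_filter, List.mem_range] at h
  obtain ⟨i, hi, j, _, rfl⟩ := h
  exact ⟨i, hi, rfl⟩

theorem pvOutK_succ (R : Nat → Nat) (M K : Nat) :
    pvOutK R M (K + 1) = pvOutK R M K ++
      ((List.range M).filter (fun j => decide (R K = R j))).map (fun j : Nat => ((K : Int), (j : Int))) := by
  unfold pvOutK
  rw [List.range_succ, List.flatMap_append, List.flatMap_singleton]
  congr 1
  simp only [List.pure_def, List.bind_eq_flatMap, ← List.map_eq_flatMap, List.map_map]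
  rfl

theorem pvEmitInnerA (M : Nat) (R : Nat → Nat) (iN : Nat) (hi : iN < M) :
    ∀ (K : Nat), K ≤ M → ∀ (p : List Int) (res : List (Int × Int)),
    pvValid p → p.length = M → (∀ y, y < M → pvRootN p y = R y) →
    (∀ q ∈ res, q.1 ≠ (iN : Int)) →
    ∃ p', (((List.range K).map (fun k : Nat => (k : Int))).foldl
        (fun st j =>
          let fi := pvFindA st.1 ((iN : Int)) (st.1.length + 1)
          let fj := pvFindA fi.1 j (fi.1.length + 1)
          (fj.1, if fi.2 = fj.2 then PySem.Set.add st.2 (((iN : Int)), j) else st.2)) (p, res))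
      = (p', res ++ ((List.range K).filter (fun j => decide (R iN = R j))).map (fun j : Nat => (((iN : Int)), (j : Int)))) ∧
      pvValid p' ∧ p'.length = M ∧ (∀ y, y < M → pvRootN p' y = R y) := by
  intro K
  induction K with
  | zero => intro _ p res hv hl hR _; exact ⟨p, by simp, hv, hl, hR⟩
  | succ K ih =>
    intro hK p res hv hl hR hres
    obtain ⟨p', he, hv', hl', hR'⟩ := ih (by omega) p res hv hl hR hres
    rw [List.range_succ, List.map_append, List.foldl_append, he]
    simp only [List.map_cons, List.map_nil, List.foldl_cons, List.foldl_nil]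
    -- the two find calls
    have hiIR : PySem.Raise.InRange p'.length ((iN : Int)) := by
      rw [hl']; constructor <;> [omega; exact_mod_cast hi]
    obtain ⟨pi, hei, hvi, hli, hri⟩ := pvFindA_spec hv' hiIR
    have hKIR : PySem.Raise.InRange pi.length ((K : Int)) := by
      rw [hli, hl']; constructor <;> [omega; exact_mod_cast hK]
    obtain ⟨pj, hej, hvj, hlj, hrj⟩ := pvFindA_spec hvi hKIR
    have hvali : pvFindA p' ((iN : Int)) (p'.length + 1) = (pi, ((R iN : Nat) : Int)) := by
      rw [hei, pvNorm_natCast, hR' iN hi]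
    have hvalj : pvFindA pi ((K : Int)) (pi.length + 1) = (pj, ((R K : Nat) : Int)) := by
      rw [hej, pvNorm_natCast, hri K (by rw [hl']; omega), hR' K (by omega)]
    refine ⟨pj, ?_, hvj, by rw [hlj, hli, hl'], fun y hy => ?_⟩
    swap
    · rw [hrj y (by rw [hli, hl']; exact hy), hri y (by rw [hl']; exact hy), hR' y hy]
    simp only [hvali, hvalj]
    by_cases hc : R iN = R K
    · rw [if_pos (by exact_mod_cast hc)]
      have hfresh : ((iN : Int), (K : Int)) ∉ res ++ ((List.range K).filter (fun j => decide (R iN = R j))).map (fun j : Nat => (((iN : Int)), (j : Int))) := by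
        intro hmem
        rcases List.mem_append.mp hmem with h | h
        · exact hres _ h rfl
        · simp only [List.mem_map, List.mem_filter, List.mem_range] at h
          obtain ⟨j, ⟨hjK, _⟩, hje⟩ := h
          have : (j : Int) = (K : Int) := (Prod.mk.injEq _ _ _ _).mp hje |>.2
          omega
      rw [pvAdd_fresh hfresh]
      simp [hc, List.filter_append]
    · rw [if_neg (by exact_mod_cast hc)]
      simp [hc, List.filter_append]

theorem pvEmitOuterA (M : Nat) (R : Nat → Nat) :
    ∀ (K : Nat), K ≤ M → ∀ (p : List Int),
    pvValid p → p.length = M → (∀ y, y < M → pvRootN p y = R y) →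
    ∃ p', (((List.range K).map (fun k : Nat => (k : Int))).foldl
        (fun st i => (((List.range M).map (fun k : Nat => (k : Int))).foldl
          (fun st j =>
            let fi := pvFindA st.1 i (st.1.length + 1)
            let fj := pvFindA fi.1 j (fi.1.length + 1)
            (fj.1, if fi.2 = fj.2 then PySem.Set.add st.2 (i, j) else st.2)) st)) (p, []))
      = (p', pvOutK R M K) ∧ pvValid p' ∧ p'.length = M ∧ (∀ y, y < M → pvRootN p' y = R y) := by
  intro K
  induction K with
  | zero => intro _ p hv hl hR; exact ⟨p, by simp [pvOutK], hv, hl, hR⟩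
  | succ K ih =>
    intro hK p hv hl hR
    obtain ⟨p', he, hv', hl', hR'⟩ := ih (by omega) p hv hl hR
    rw [List.range_succ, List.map_append, List.foldl_append, he]
    simp only [List.map_cons, List.map_nil, List.foldl_cons, List.foldl_nil]
    obtain ⟨p'', he'', hv'', hl'', hR''⟩ :=
      pvEmitInnerA M R K (by omega) M le_rfl p' (pvOutK R M K) hv' hl' hR'
        (fun q hq => by
          obtain ⟨i', hi', hfst⟩ := pvOutK_fst hq
          rw [hfst]
          intro hc
          have : i' = K := by exact_mod_cast hc
          omega)
    rw [he'']
    exact ⟨p'', by rw [pvOutK_succ], hv'', hl'', hR''⟩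

theorem pvEmitB (M : Nat) (R : Nat → Nat)
    (G : Int → List Int)
    (hG : ∀ k : Nat, k < M → G ((k : Int)) = ((List.range M).filter (fun j => decide (R k = R j))).map (fun j : Nat => (j : Int))) :
    ∀ (K : Nat), K ≤ M →
    (((List.range K).map (fun k : Nat => (k : Int))).foldl
        (fun res i => (G i).foldl (fun res j => PySem.Set.add res (i, j)) res) [])
      = pvOutK R M K := by
  intro K
  induction K with
  | zero => simp [pvOutK]
  | succ K ih =>
    intro hK
    rw [List.range_succ, List.map_append, List.foldl_append, ih (by omega)]
    simp only [List.map_cons, List.map_nil, List.foldl_cons, List.foldl_nil]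
    rw [hG K (by omega)]
    rw [pvFoldAddPairs ((K : Int)) _ (pvOutK R M K) ?nodup ?fresh]
    · rw [pvOutK_succ]
      congr 1
      rw [List.map_map]
      rfl
    case nodup =>
      exact ((List.nodup_range).filter _).map (fun a b h => by exact_mod_cast h)
    case fresh =>
      intro j hj hmem
      obtain ⟨i', hi', hfst⟩ := pvOutK_fst hmem
      simp at hfst
      omega

theorem pvCompB {q : List Int} {n : Int} (hv : pvValid q) (hl : q.length = n.toNat)
    {R : Nat → Nat} (hR : ∀ y, y < n.toNat → pvRootN q y = R y) :
    (PySem.List.pyRange 0 n 1).map (fun i => pvFindB q i (q.length + 1))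
      = (List.range n.toNat).map (fun k : Nat => ((R k : Nat) : Int)) := by
  rw [pvRange_eq, List.map_map]
  apply List.map_congr_left
  intro k hk
  have hkM : k < n.toNat := List.mem_range.mp hk
  have hIR : PySem.Raise.InRange q.length ((k : Nat) : Int) := by
    rw [hl]; constructor <;> [omega; exact_mod_cast hkM]
  simp only [Function.comp_apply]
  rw [pvFindB_spec hv hIR, pvNorm_natCast, hR k hkM]

theorem pvMembers (M : Nat) (R : Nat → Nat) (c : Int) :
    ((PySem.List.enumerate ((List.range M).map (fun k : Nat => ((R k : Nat) : Int))) 0).foldl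
        (fun d q => d.modify q.2 [] (fun l => l ++ [q.1]))
        (PySem.Dict.empty : PySem.Dict Int (List Int))).getD c []
      = ((List.range M).filter (fun j => ((R j : Nat) : Int) == c)).map (fun j : Nat => (j : Int)) := by
  have hE : PySem.List.enumerate ((List.range M).map (fun k : Nat => ((R k : Nat) : Int))) 0
      = (List.range M).map (fun k : Nat => ((k : Int), ((R k : Nat) : Int))) := by
    rw [PySem.List.enumerate_eq_map_pyRange _ (0 : Int)]
    have hlen : PySem.List.len ((List.range M).map (fun k : Nat => ((R k : Nat) : Int))) = (M : Int) := by
      simp [PySem.List.len]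
    rw [hlen, PySem.List.pyRange_zero_natCast, List.map_map]
    apply List.map_congr_left
    intro k hk
    have hkM : k < M := List.mem_range.mp hk
    simp only [Function.comp_apply]
    rw [PySem.List.pyGetD_natCast, PySem.List.getD_map_range _ _ _ _ hkM]
  rw [hE]
  have hswapfold :
      ((List.range M).map (fun k : Nat => ((k : Int), ((R k : Nat) : Int)))).foldl
        (fun d q => d.modify q.2 [] (fun l => l ++ [q.1]))
        (PySem.Dict.empty : PySem.Dict Int (List Int))
      = (((List.range M).map (fun k : Nat => ((k : Int), ((R k : Nat) : Int)))).map Prod.swap).foldl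
        (fun d q => d.modify q.1 [] (fun l => l ++ [q.2]))
        (PySem.Dict.empty : PySem.Dict Int (List Int)) := by
    rw [List.map_map]
    rw [List.foldl_map, List.foldl_map]
    simp only [Function.comp_apply, Prod.swap_prod_mk]
  rw [hswapfold, PySem.Dict.getD_foldl_modify_append]
  rw [List.map_map]
  have hswap : (Prod.swap ∘ fun k : Nat => ((k : Int), ((R k : Nat) : Int)))
      = fun k : Nat => (((R k : Nat) : Int), (k : Int)) := by
    funext k; simp
  rw [hswap, List.filter_map, List.map_map]
  simp only [PySem.Dict.getD_empty, List.nil_append]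
  rfl

-- ===== VERDICT (by name: the statement is the Claim_ definition above) =====
theorem transitive_closure_equiv_spec : Claim_equal_transitive_closure_equiv := by
  intro pairs n _hdom hpre
  unfold Spec_transitive_closure_equiv transitive_closure_equiv transitive_closure_equiv_alt
  change ((PySem.List.pyRange 0 n 1).foldl
      (fun st i =>
        (PySem.List.pyRange 0 n 1).foldl
          (fun st j =>
            let fi := pvFindA st.1 i (st.1.length + 1)
            let fj := pvFindA fi.1 j (fi.1.length + 1)
            (fj.1, if fi.2 = fj.2 then PySem.Set.add st.2 (i, j) else st.2)) st)
      (pairs.foldl (fun p ab =>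
        let fx := pvFindA p ab.1 (p.length + 1)
        let fy := pvFindA fx.1 ab.2 (fx.1.length + 1)
        if fx.2 ≠ fy.2 then PySem.List.pySetD fy.1 fx.2 fy.2 else fy.1)
        (PySem.List.pyRange 0 n 1), ([] : List (Int × Int)))).2
    = (let parent := pairs.foldl (fun p ab =>
          let ra := pvFindB p ab.1 (p.length + 1)
          let rb := pvFindB p ab.2 (p.length + 1)
          if ra ≠ rb then PySem.List.pySetD p ra rb else p) (PySem.List.pyRange 0 n 1)
       let comp := (PySem.List.pyRange 0 n 1).map (fun i => pvFindB parent i (parent.length + 1))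
       let members := (PySem.List.enumerate comp 0).foldl
          (fun d q => d.modify q.2 [] (fun l => l ++ [q.1])) (PySem.Dict.empty : PySem.Dict Int (List Int))
       (PySem.List.pyRange 0 n 1).foldl (fun res i =>
          (members.getD (PySem.List.pyGetD comp i 0) []).foldl
            (fun res j => PySem.Set.add res (i, j)) res) [])
  -- names for the two union-phase results
  obtain ⟨qA, hqA⟩ : ∃ qA, pairs.foldl (fun p ab =>
        let fx := pvFindA p ab.1 (p.length + 1)
        let fy := pvFindA fx.1 ab.2 (fx.1.length + 1)
        if fx.2 ≠ fy.2 then PySem.List.pySetD fy.1 fx.2 fy.2 else fy.1)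
        (PySem.List.pyRange 0 n 1) = qA := ⟨_, rfl⟩
  obtain ⟨qB, hqB⟩ : ∃ qB, pairs.foldl (fun p ab =>
        let ra := pvFindB p ab.1 (p.length + 1)
        let rb := pvFindB p ab.2 (p.length + 1)
        if ra ≠ rb then PySem.List.pySetD p ra rb else p)
        (PySem.List.pyRange 0 n 1) = qB := ⟨_, rfl⟩
  rw [hqA, hqB]
  have hunion := pvUnion_fold n.toNat pairs hpre _ _ (pvP0_valid n) (pvP0_valid n)
      (pvP0_len n) (pvP0_len n) (fun y _ => rfl)
  rw [hqA, hqB] at hunion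
  obtain ⟨hvA, hvB, hlA, hlB, hRR⟩ := hunion
  -- the common root function after all unions
  set R : Nat → Nat := fun y => pvRootN qB y with hRdef
  have hRA : ∀ y, y < n.toNat → pvRootN qA y = R y := hRR
  have hRB : ∀ y, y < n.toNat → pvRootN qB y = R y := fun y _ => rfl
  -- B: the comp list
  simp only []
  rw [pvCompB hvB hlB hRB]
  -- A: the emission double loop
  rw [pvRange_eq n]
  obtain ⟨pE, heE⟩ := pvEmitOuterA n.toNat R n.toNat le_rfl qA hvA hlA hRA
  rw [heE.1]
  -- B: the grouped emission loop
  rw [pvEmitB n.toNat R _ ?hG n.toNat le_rfl]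
  case hG =>
    intro k hk
    rw [PySem.List.pyGetD_natCast, PySem.List.getD_map_range _ _ _ _ hk, pvMembers n.toNat R]
    congr 1
    apply List.filter_congr
    intro j _
    by_cases hc : R k = R j
    · simp [hc]
    · simp only [decide_eq_false hc]
      rw [beq_eq_false_iff_ne]
      intro he
      exact hc (by exact_mod_cast he.symm)
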